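-- pv_equiv track=rewrite | github.com/Jurgenmn/programing_notes | Jamal/calculator/list_practice.py | func31
-- ===== SOURCE A (Python) =====
-- def func31(numbers):
--     firstNum = numbers[0]
--     counter = 0
--     secondNum = 0
--     for i in numbers:
--         if firstNum == i:   #i is the current element because we are not doing range
--             counter = counter + 1
--         elif counter > 1:
--             secondNum = i
--
--
--     return secondNum
-- ===== SOURCE B (Python) =====
-- def func31(numbers):
--     first = numbers[0]
--     rest = numbers[1:]
--     if first not in rest:
--         return 0
--     tail = rest[rest.index(first) + 1:]
--     for x in reversed(tail):
--         if x != first: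
--             return x
--     return 0
-- ===== Notes on version B (the rewrite author's own statement) =====
-- stated objective: simpler
-- what changed: Replaces A's single stateful loop (counter + last-seen accumulator) by two independent steps: list.index locates the second occurrence of numbers[0] inside numbers[1:], then a reverse scan of the remaining tail returns the first element different from it (0 if none).
import Mathlib
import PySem

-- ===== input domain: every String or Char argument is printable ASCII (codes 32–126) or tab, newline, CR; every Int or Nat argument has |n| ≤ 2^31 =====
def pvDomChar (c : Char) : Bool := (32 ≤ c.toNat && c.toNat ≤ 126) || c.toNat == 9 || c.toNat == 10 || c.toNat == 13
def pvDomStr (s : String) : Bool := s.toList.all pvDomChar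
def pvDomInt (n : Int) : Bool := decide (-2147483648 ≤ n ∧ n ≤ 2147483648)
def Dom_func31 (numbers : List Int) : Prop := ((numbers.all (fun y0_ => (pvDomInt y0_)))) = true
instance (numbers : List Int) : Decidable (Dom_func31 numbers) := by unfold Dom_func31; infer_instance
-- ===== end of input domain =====

-- B replaces A's single stateful counter loop by an idiomatic decomposition: locate the second
-- occurrence of numbers[0] with list.index, then scan the remaining tail in reverse for the first
-- element different from it (objective: simpler). Same cost, no speed claim.

-- ===== PORT A =====
-- the for-loop: state (counter, secondNum)
def func31Loop (f : Int) : List Int → Int → Int → Int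
  | [], _, s => s
  | i :: t, c, s =>
    if f == i then func31Loop f t (c + 1) s
    else if c > 1 then func31Loop f t c i
    else func31Loop f t c s

def func31 (numbers : List Int) : Int :=
  match PySem.List.pyGet? numbers 0 with
  | none => 0            -- numbers[0] raises IndexError: excluded by Pre_func31
  | some f => func31Loop f numbers 0 0

-- ===== PORT B =====
-- 'for x in reversed(tail): if x != first: return x / return 0'
def func31RevScan (f : Int) : List Int → Int
  | [] => 0
  | x :: t => if x ≠ f then x else func31RevScan f t

def func31_alt (numbers : List Int) : Int :=
  match PySem.List.pyGet? numbers 0 with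
  | none => 0            -- numbers[0] raises IndexError: excluded by Pre_func31
  | some f =>
    let rest := PySem.List.slice numbers (some 1) none
    match PySem.List.index? rest f with
    | none => 0          -- 'first not in rest'
    | some i =>
      func31RevScan f (PySem.List.slice rest (some ((i : Int) + 1)) none).reverse

-- ===== PRECONDITION & SPEC =====
-- Pre_ excludes only the empty list, on which A raises IndexError at numbers[0].
def Pre_func31 (numbers : List Int) : Prop := numbers ≠ []
instance (numbers : List Int) : Decidable (Pre_func31 numbers) := by unfold Pre_func31; infer_instance

def pvWitness_func31 : List Int := [2, 1, 2, 5, 2, 7]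

def Spec_func31 (numbers : List Int) (out : Int) : Prop := out = func31_alt numbers
instance (numbers : List Int) (out : Int) : Decidable (Spec_func31 numbers out) := by unfold Spec_func31; infer_instance

-- ===== CLAIM (what is proved, stated in full; the proofs are below) =====
def Claim_equal_func31 : Prop := ∀ (numbers : List Int), Dom_func31 numbers → Pre_func31 numbers → Spec_func31 numbers (func31 numbers)

-- ===== LEMMAS AND PROOFS =====

-- B's reverse scan is just find? of the first element ≠ f, defaulting to 0
theorem revScan_eq_find (f : Int) (l : List Int) :
    func31RevScan f l = (l.find? (fun x => decide (x ≠ f))).getD 0 := by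
  induction l with
  | nil => rfl
  | cons x t ih =>
    by_cases hx : x = f <;> simp [func31RevScan, List.find?, hx, ih]

-- once counter > 1, A's loop returns the last element ≠ f of the rest, else the current s
theorem loopA_of_gt (f : Int) (l : List Int) : ∀ (c s : Int), 1 < c →
    func31Loop f l c s = (l.reverse.find? (fun x => decide (x ≠ f))).getD s := by
  induction l with
  | nil => intro c s _; rfl
  | cons x t ih =>
    intro c s hc
    by_cases hx : f = x
    · subst hx
      simp only [func31Loop, beq_self_eq_true, if_pos, List.reverse_cons, List.find?_append]
      rw [ih _ _ (by omega)]
      simp [List.find?]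
    · have hx' : (f == x) = false := by simp [hx]
      simp only [func31Loop, hx', Bool.false_eq_true, if_pos hc, List.reverse_cons,
        List.find?_append]
      rw [ih _ _ hc]
      have : List.find? (fun y => decide (y ≠ f)) [x] = some x := by
        simp [List.find?, Ne.symm hx]
      rw [this]
      cases List.find? (fun y => decide (y ≠ f)) t.reverse <;> simp [Option.or]

-- the counter = 1 phase: scan for the second occurrence of f, then switch to the > 1 phase
theorem loopA_of_one (f : Int) (t : List Int) : ∀ (s : Int),
    func31Loop f t 1 s =
      (match PySem.List.index? t f with
       | none => s
       | some i => (((t.drop (i + 1)).reverse.find? (fun x => decide (x ≠ f))).getD s)) := by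
  induction t with
  | nil => intro s; rfl
  | cons x t ih =>
    intro s
    by_cases hx : f = x
    · subst hx
      rw [PySem.List.index?_cons_self]
      simp only [func31Loop, beq_self_eq_true, if_pos]
      rw [loopA_of_gt f t (1 + 1) s (by omega)]
      simp
    · have hx' : (f == x) = false := by simp [hx]
      rw [PySem.List.index?_cons_of_ne t (Ne.symm hx)]
      simp only [func31Loop, hx', Bool.false_eq_true, if_false, show ¬((1:Int) > 1) by omega]
      rw [ih s]
      cases h : PySem.List.index? t f with
      | none => simp
      | some i => simp [List.drop_succ_cons]

-- ===== VERDICT (by name: the statement is the Claim_ definition above) =====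
theorem func31_spec : Claim_equal_func31 := by
  intro numbers _ hpre
  unfold Spec_func31
  cases numbers with
  | nil => exact absurd rfl hpre
  | cons f t =>
    show func31 (f :: t) = func31_alt (f :: t)
    unfold func31 func31_alt
    simp only [PySem.List.pyGet?, PySem.List.pyIdx?]
    norm_num
    rw [PySem.List.slice_from_one]
    simp only [List.tail_cons]
    show func31Loop f (f :: t) 0 0 = _
    have h0 : func31Loop f (f :: t) 0 0 = func31Loop f t 1 0 := by
      simp [func31Loop]
    rw [h0, loopA_of_one]
    cases h : PySem.List.index? t f with
    | none =>
      rw [PySem.List.index?_eq_idxOf?] at h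
      simp [h]
    | some i =>
      rw [PySem.List.index?_eq_idxOf?] at h
      simp only [h]
      have hc : ((i : Int) + 1) = ((i + 1 : Nat) : Int) := by push_cast; ring
      rw [hc, PySem.List.slice_from_natCast, revScan_eq_find]
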